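-- pv_equiv track=rewrite | github.com/JaidenAtterbury/CSE-160 | Exams/midterm_22au.py | zombie_list
-- ===== SOURCE A (Python) =====
-- def zombie_list(initial_list, output_list_size, bunch_size):
--     """
--     Returns a new list based on initial_list.
--
--     Arguments:
--         initial_list (list): a list of ints that the returned list is based on
--         output_list_size (int): the number of ints in the returned list
--         bunch_size (int): the number of previous values in the list that should
--         be summed to create the next entry in the returned list
--
--     Returns:
--         A list of output_list_size ints created from intitial_list by summing
--         the prior bunch_size values to create the next entry.
--     """
--     new_list = initial_list[:]
--     for i in range(len(new_list), output_list_size):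
--         total = 0
--         for j in range(-1 * bunch_size, 0):
--             total += new_list[j]
--         new_list.append(total)
--     return new_list
-- ===== SOURCE B (Python) =====
-- def zombie_list(initial_list, output_list_size, bunch_size):
--     out = list(initial_list)
--     if bunch_size <= 0:
--         out.extend([0] * (output_list_size - len(out)))
--         return out
--     window = sum(out[-bunch_size:])
--     while len(out) < output_list_size:
--         out.append(window)
--         window += out[-1] - out[-1 - bunch_size]
--     return out
-- ===== Notes on version B (the rewrite author's own statement) =====
-- stated objective: alternative
-- what changed: Replaces A's inner loop that re-sums the last bunch_size entries before every append by a sliding-window sum maintained incrementally (window += newest - departing), one constant-size update per appended element.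
-- outside the precondition, e.g. on zombie_list([1], 3, 2): A raises IndexError, B raises IndexError
import Mathlib
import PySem

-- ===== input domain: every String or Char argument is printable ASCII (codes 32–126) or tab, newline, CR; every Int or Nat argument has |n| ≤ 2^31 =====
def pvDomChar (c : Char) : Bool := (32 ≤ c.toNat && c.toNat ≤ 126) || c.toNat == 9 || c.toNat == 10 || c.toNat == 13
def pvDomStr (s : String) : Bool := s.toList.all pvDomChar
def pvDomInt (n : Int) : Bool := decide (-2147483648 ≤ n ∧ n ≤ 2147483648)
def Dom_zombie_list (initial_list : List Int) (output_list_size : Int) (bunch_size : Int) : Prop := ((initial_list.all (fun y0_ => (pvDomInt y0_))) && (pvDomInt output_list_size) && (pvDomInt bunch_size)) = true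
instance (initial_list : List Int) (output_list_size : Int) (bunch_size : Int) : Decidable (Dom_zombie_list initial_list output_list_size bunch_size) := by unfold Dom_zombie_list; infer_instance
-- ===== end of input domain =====

-- B replaces A's per-append re-summation of the last bunch_size entries by an incrementally
-- maintained sliding-window sum, one constant-size update per appended element (objective: alternative).

-- ===== PORT A =====
-- literal transliteration of A: copy the list, then for each i in range(len, output_list_size)
-- re-sum new_list[j] for j in range(-bunch_size, 0) and append.
def zombie_list (initial_list : List Int) (output_list_size : Int) (bunch_size : Int) : List Int :=
  (PySem.List.pyRange (initial_list.length : Int) output_list_size 1).foldl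
    (fun new_list _ =>
      let total := (PySem.List.pyRange (-1 * bunch_size) 0 1).foldl
        (fun t j => t + PySem.List.pyGetD new_list j 0) 0
      new_list ++ [total])
    initial_list

-- ===== PORT B =====
-- while-loop of Source B: appends `window`, then updates window += out[-1] - out[-1-bunch_size];
-- fuel = number of appends still to do.
def zlAltGo (bunch_size : Int) : Nat → Int → List Int → List Int
  | 0, _, out => out
  | k + 1, window, out =>
      let out' := out ++ [window]
      zlAltGo bunch_size k
        (window + (PySem.List.pyGetD out' (-1) 0 - PySem.List.pyGetD out' (-1 - bunch_size) 0))
        out'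

def zombie_list_alt (initial_list : List Int) (output_list_size : Int) (bunch_size : Int) : List Int :=
  if bunch_size ≤ 0 then
    initial_list ++ List.replicate (output_list_size - initial_list.length).toNat 0
  else
    zlAltGo bunch_size (output_list_size - initial_list.length).toNat
      (PySem.List.slice initial_list (some (-bunch_size)) none).sum
      initial_list

-- ===== PRECONDITION & SPEC =====
-- Pre_ excludes exactly the inputs where A raises IndexError: an append is needed
-- (output_list_size > len) while bunch_size exceeds the initial length.
def Pre_zombie_list (initial_list : List Int) (output_list_size : Int) (bunch_size : Int) : Prop :=
  output_list_size ≤ (initial_list.length : Int) ∨ bunch_size ≤ (initial_list.length : Int)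
instance (initial_list : List Int) (output_list_size : Int) (bunch_size : Int) : Decidable (Pre_zombie_list initial_list output_list_size bunch_size) := by unfold Pre_zombie_list; infer_instance
def pvWitness_zombie_list : List Int × Int × Int := ([1, 2, 3], 7, 2)

def Spec_zombie_list (initial_list : List Int) (output_list_size : Int) (bunch_size : Int) (out : List Int) : Prop := out = zombie_list_alt initial_list output_list_size bunch_size
instance (initial_list : List Int) (output_list_size : Int) (bunch_size : Int) (out : List Int) : Decidable (Spec_zombie_list initial_list output_list_size bunch_size out) := by unfold Spec_zombie_list; infer_instance

-- ===== CLAIM (what is proved, stated in full; the proofs are below) =====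
def Claim_equal_zombie_list : Prop := ∀ (initial_list : List Int) (output_list_size : Int) (bunch_size : Int), Dom_zombie_list initial_list output_list_size bunch_size → Pre_zombie_list initial_list output_list_size bunch_size → Spec_zombie_list initial_list output_list_size bunch_size (zombie_list initial_list output_list_size bunch_size)

-- ===== LEMMAS AND PROOFS =====

/-- sum of the last `b` elements -/
def sumLast (xs : List Int) (b : Nat) : Int := (xs.drop (xs.length - b)).sum

-- appended below claim block
/-- iterate a state transformer ignoring the list elements -/
lemma foldlIgnore {α β : Type} (f : β → β) : ∀ (xs : List α) (init : β),
    xs.foldl (fun s _ => f s) init = f^[xs.length] init := by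
  intro xs
  induction xs with
  | nil => intro init; rfl
  | cons x xs ih =>
      intro init
      simp [List.foldl_cons, ih, Function.iterate_succ_apply]

lemma appendZeros (m : Nat) : ∀ (l : List Int),
    (fun nl : List Int => nl ++ [0])^[m] l = l ++ List.replicate m 0 := by
  induction m with
  | zero => intro l; simp
  | succ m ih =>
      intro l
      rw [Function.iterate_succ_apply, ih]
      simp [List.replicate_succ]

/-- A's inner loop re-sums the last `b` entries -/
lemma innerSumEq (b : Nat) (hb : 0 < b) (out : List Int) (hlen : b ≤ out.length) :
    (PySem.List.pyRange (-1 * (b : Int)) 0 1).foldl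
        (fun t j => t + PySem.List.pyGetD out j 0) 0
      = sumLast out b := by
  rw [PySem.List.foldl_add]
  have hmap : (PySem.List.pyRange (-1 * (b : Int)) 0 1).map (fun j => PySem.List.pyGetD out j 0)
      = out.drop (out.length - b) := by
    apply List.ext_getElem
    · simp [PySem.List.length_pyRange_one]; omega
    · intro k hk1 hk2
      have hkb : k < b := by
        simp [PySem.List.length_pyRange_one] at hk1; omega
      rw [List.getElem_map, PySem.List.getElem_pyRange_one]
      have hid : (-1 * (b : Int) + k) = -(((b - k : Nat) : Int)) := by
        push_cast [Nat.cast_sub hkb.le]; ring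
      rw [hid, PySem.List.pyGetD_neg_natCast _ _ _ (by omega) (by omega)]
      rw [List.getElem_drop]
      congr 1
      omega
  rw [hmap]
  simp [sumLast]

lemma sumLastAppend (b : Nat) (hb : 0 < b) (out : List Int) (hlen : b ≤ out.length) (w : Int) :
    sumLast (out ++ [w]) b = sumLast out b - out[out.length - b]'(by omega) + w := by
  unfold sumLast
  have h2 : out.length - b < out.length := by omega
  have hdrop : List.drop (out.length - b) out
      = out[out.length - b] :: List.drop (out.length - b + 1) out :=
    List.drop_eq_getElem_cons h2
  rw [List.length_append]
  have h1 : out.length + [w].length - b = (out.length - b) + 1 := by simp; omega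
  rw [h1, List.drop_append_of_le_length (by omega), List.sum_append, hdrop, List.sum_cons]
  simp only [List.sum_cons, List.sum_nil]
  ring

/-- the main invariant: A's iterated append equals B's window loop -/
lemma mainInv (b : Nat) (hb : 0 < b) : ∀ (m : Nat) (out : List Int), b ≤ out.length →
    (fun nl : List Int => nl ++ [(PySem.List.pyRange (-1 * (b : Int)) 0 1).foldl
        (fun t j => t + PySem.List.pyGetD nl j 0) 0])^[m] out
      = zlAltGo (b : Int) m (sumLast out b) out := by
  intro m
  induction m with
  | zero => intro out _; rfl
  | succ m ih =>
      intro out hlen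
      rw [Function.iterate_succ_apply]
      simp only [innerSumEq b hb out hlen]
      rw [ih (out ++ [sumLast out b]) (by simp only [List.length_append, List.length_cons, List.length_nil]; omega)]
      show zlAltGo (b:Int) m (sumLast (out ++ [sumLast out b]) b) (out ++ [sumLast out b])
        = zlAltGo (b:Int) (m+1) (sumLast out b) out
      rw [zlAltGo]
      congr 1
      rw [sumLastAppend b hb out hlen]
      rw [PySem.List.pyGetD_neg_one_append_singleton]
      have hneg : (-1 - (b : Int)) = -(((b + 1 : Nat)) : Int) := by push_cast; ring
      have hlen' : (out ++ [sumLast out b]).length = out.length + 1 := by simp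
      rw [hneg, PySem.List.pyGetD_neg_natCast _ _ _ (by omega) (by rw [hlen']; omega)]
      rw [List.getElem_append_left (by rw [hlen']; omega)]
      have heq : (out ++ [sumLast out b]).length - (b + 1) = out.length - b := by
        rw [hlen']; omega
      simp only [heq]
      ring

-- ===== VERDICT (by name: the statement is the Claim_ definition above) =====
theorem zombie_list_spec : Claim_equal_zombie_list := by
  intro l osz bsz _ hpre
  unfold Spec_zombie_list zombie_list zombie_list_alt
  rw [foldlIgnore]
  rw [PySem.List.length_pyRange_one]
  by_cases hb : bsz ≤ 0
  · rw [if_pos hb]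
    have : (PySem.List.pyRange (-1 * bsz) 0 1) = [] :=
      PySem.List.pyRange_one_eq_nil (by omega)
    simp only [this, List.foldl_nil]
    exact appendZeros _ l
  · rw [if_neg hb]
    replace hb : 0 < bsz := by omega
    set b := bsz.toNat with hbdef
    have hcast : bsz = (b : Int) := by omega
    by_cases hm : osz ≤ (l.length : Int)
    · have : (osz - (l.length:Int)).toNat = 0 := by omega
      rw [this]
      rfl
    · have hble : b ≤ l.length := by
        rcases hpre with h | h
        · omega
        · omega
      rw [hcast]
      rw [mainInv b (by omega) _ l hble]
      congr 1
      rw [PySem.List.slice_from_neg_natCast _ _ (by omega)]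
      rfl
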